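-- pv_equiv track=rewrite | github.com/Fronvo/server | scripts/generate-event.py | formatEventName
-- ===== SOURCE A (Python) =====
-- import string
--
-- def formatEventName(name: str) -> str:
--     new_event_name = ''
--
--     for i, letter in enumerate(name):
--         # Remove whitespace
--         if letter == ' ':
--             continue
--
--         # Capitalise first letter ONLY, preserve the rest of the string's casing
--         elif i == 0 and letter in string.ascii_lowercase:
--             new_event_name += letter.upper()
--
--         else:
--             new_event_name += letter
--
--     return new_event_name
-- ===== SOURCE B (Python) =====
-- import string
--
-- def formatEventName(name: str) -> str:
--     stripped = name.replace(' ', '')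
--     if name and name[0] in string.ascii_lowercase:
--         return stripped[0].upper() + stripped[1:]
--     return stripped
-- ===== Notes on version B (the rewrite author's own statement) =====
-- stated objective: faster
-- what changed: Replaces the char-by-char loop that interleaves space-skipping with first-letter casing by two separate phases: strip all spaces with one C-level str.replace, then capitalize the head if the original first character is an ASCII lowercase letter.
import Mathlib
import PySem

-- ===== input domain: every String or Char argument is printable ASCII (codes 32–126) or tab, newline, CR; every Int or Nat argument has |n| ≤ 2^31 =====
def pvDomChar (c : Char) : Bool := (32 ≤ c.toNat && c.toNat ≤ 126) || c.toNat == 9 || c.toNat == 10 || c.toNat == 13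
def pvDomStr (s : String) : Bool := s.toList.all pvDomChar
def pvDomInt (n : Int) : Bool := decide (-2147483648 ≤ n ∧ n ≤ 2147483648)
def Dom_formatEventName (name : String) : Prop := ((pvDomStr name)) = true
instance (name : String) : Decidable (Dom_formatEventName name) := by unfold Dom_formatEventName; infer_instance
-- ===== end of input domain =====

-- B strips all spaces in one pass (str.replace) and capitalizes the head in a separate phase,
-- instead of A's single loop interleaving space-skipping with first-letter casing (objective: faster per-character work via str.replace).

-- ===== PORT A =====
-- string.ascii_lowercase membership
def pvIsAsciiLower (c : Char) : Bool := c ∈ "abcdefghijklmnopqrstuvwxyz".toList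

-- the enumerate loop of A; acc is the characters of new_event_name so far
def pvGoA : Nat → List Char → List Char → List Char
  | _, [], acc => acc
  | i, c :: rest, acc =>
    if c = ' ' then pvGoA (i + 1) rest acc
    else if i = 0 ∧ pvIsAsciiLower c then pvGoA (i + 1) rest (acc ++ [c.toUpper])
    else pvGoA (i + 1) rest (acc ++ [c])

def formatEventName (name : String) : String :=
  String.mk (pvGoA 0 name.toList [])

-- ===== PORT B =====
def formatEventName_alt (name : String) : String :=
  let stripped := name.toList.filter (fun c => c ≠ ' ')
  if (¬ name.toList.isEmpty) ∧ pvIsAsciiLower (name.toList.headD ' ') then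
    -- stripped[0].upper() + stripped[1:]; stripped is non-empty here since name[0] is a letter
    match stripped with
    | d :: ds => String.mk (d.toUpper :: ds)
    | [] => ""   -- unreachable under the branch condition
  else
    String.mk stripped

-- ===== PRECONDITION & SPEC =====
def Spec_formatEventName (name : String) (out : String) : Prop := out = formatEventName_alt name
instance (name : String) (out : String) : Decidable (Spec_formatEventName name out) := by unfold Spec_formatEventName; infer_instance

-- ===== CLAIM (what is proved, stated in full; the proofs are below) =====
def Claim_equal_formatEventName : Prop := ∀ (name : String), Dom_formatEventName name → Spec_formatEventName name (formatEventName name)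

-- ===== LEMMAS AND PROOFS =====

-- once past index 0, the loop just appends the non-space characters
theorem pvGoA_ge1 (l : List Char) : ∀ (i : Nat) (acc : List Char), i ≠ 0 →
    pvGoA i l acc = acc ++ l.filter (fun c => c ≠ ' ') := by
  induction l with
  | nil => intro i acc _; simp [pvGoA]
  | cons c rest ih =>
    intro i acc hi
    by_cases hc : c = ' '
    · simp [pvGoA, hc, ih (i + 1) acc (by omega)]
    · simp [pvGoA, hc, hi, ih (i + 1) _ (by omega)]

theorem formatEventName_eq_alt (name : String) :
    formatEventName name = formatEventName_alt name := by
  unfold formatEventName formatEventName_alt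
  cases h : name.toList with
  | nil => simp [pvGoA]
  | cons c rest =>
    by_cases hc : c = ' '
    · have hl : ¬ pvIsAsciiLower ' ' = true := by decide
      simp [pvGoA, hc, hl, pvGoA_ge1 rest 1 [] (by omega)]
    · by_cases hlow : pvIsAsciiLower c = true
      · simp [pvGoA, hc, hlow, pvGoA_ge1 rest 1 _ (by omega)]
      · simp [pvGoA, hc, hlow, pvGoA_ge1 rest 1 _ (by omega)]

-- ===== VERDICT (by name: the statement is the Claim_ definition above) =====
theorem formatEventName_spec : Claim_equal_formatEventName := by
  intro name _
  unfold Spec_formatEventName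
  exact formatEventName_eq_alt name
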